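-- pv_equiv track=rewrite | github.com/ostinatocc/workbench | src/aionis_workbench/policies.py | _dedupe_latest_by_prefix_with_overflow
-- ===== SOURCE A (Python) =====
-- def _dedupe_latest_by_prefix_with_overflow(items: list[str], prefixes: tuple[str, ...]) -> tuple[list[str], list[str]]:
--     kept: list[str] = []
--     overflow: list[str] = []
--     seen_prefixes: set[str] = set()
--
--     for item in reversed(items):
--         matched_prefix = next((prefix for prefix in prefixes if item.startswith(prefix)), None)
--         if matched_prefix is None:
--             if item not in kept:
--                 kept.append(item)
--             continue
--         if matched_prefix in seen_prefixes:
--             overflow.append(item)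
--             continue
--         seen_prefixes.add(matched_prefix)
--         kept.append(item)
--
--     kept.reverse()
--     overflow.reverse()
--     return kept, overflow
-- ===== SOURCE B (Python) =====
-- def _dedupe_latest_by_prefix_with_overflow(items: list[str], prefixes: tuple[str, ...]) -> tuple[list[str], list[str]]:
--     # Forward single-direction pass: first-matching prefixes are computed once, then
--     # each item's fate is decided by looking at the items after it, so there is no
--     # reversed() scan, no seen-set and no final .reverse() calls.
--     firsts = [next((prefix for prefix in prefixes if item.startswith(prefix)), None) for item in items]
--     kept: list[str] = []
--     overflow: list[str] = []
--     for i, (item, matched) in enumerate(zip(items, firsts)):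
--         if matched is None:
--             if item not in items[i + 1:]:
--                 kept.append(item)
--         elif matched in firsts[i + 1:]:
--             overflow.append(item)
--         else:
--             kept.append(item)
--     return kept, overflow
-- ===== Notes on version B (the rewrite author's own statement) =====
-- stated objective: alternative
-- what changed: Replaces A's backward scan with mutable kept/overflow/seen-prefix state and final list reversals by a single forward pass that decides each item's fate by inspecting only the items after it (last-occurrence / last-matching-prefix tests on the suffix), with no seen-set and no reversal.
import Mathlib
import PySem

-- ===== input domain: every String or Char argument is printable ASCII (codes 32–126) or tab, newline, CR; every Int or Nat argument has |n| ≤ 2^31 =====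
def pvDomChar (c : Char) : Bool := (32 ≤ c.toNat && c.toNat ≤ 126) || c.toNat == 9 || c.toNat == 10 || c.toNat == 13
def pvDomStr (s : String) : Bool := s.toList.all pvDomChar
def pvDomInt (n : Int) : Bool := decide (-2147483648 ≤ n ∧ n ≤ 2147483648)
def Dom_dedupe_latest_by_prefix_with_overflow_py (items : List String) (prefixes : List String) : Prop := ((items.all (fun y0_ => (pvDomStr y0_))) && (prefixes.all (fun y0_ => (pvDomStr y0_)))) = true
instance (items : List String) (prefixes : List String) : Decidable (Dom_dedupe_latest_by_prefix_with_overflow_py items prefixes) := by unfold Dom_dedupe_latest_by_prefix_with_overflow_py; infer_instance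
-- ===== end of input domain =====

-- B replaces A's backward scan with mutable kept/overflow/seen state and final reversals
-- by a single forward pass deciding each item from the items after it (objective: alternative).


-- ===== PORT A =====
-- next((prefix for prefix in prefixes if item.startswith(prefix)), None)
def pvFirstPrefix (prefixes : List String) (item : String) : Option String :=
  prefixes.find? (fun p => PySem.Str.startswith item p)

-- one iteration of A's 'for item in reversed(items)' loop; state = (kept, overflow, seen_prefixes)
def pvAStep (prefixes : List String)
    (st : List String × List String × PySem.Set String) (item : String) :
    List String × List String × PySem.Set String :=
  match pvFirstPrefix prefixes item with
  | none =>
      if st.1.contains item then st else (st.1 ++ [item], st.2.1, st.2.2)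
  | some p =>
      if PySem.Set.contains st.2.2 p then (st.1, st.2.1 ++ [item], st.2.2)
      else (st.1 ++ [item], st.2.1, PySem.Set.add st.2.2 p)

def dedupe_latest_by_prefix_with_overflow_py (items : List String) (prefixes : List String) : List String × List String :=
  let st := items.reverse.foldl (pvAStep prefixes) ([], [], PySem.Set.empty)
  (st.1.reverse, st.2.1.reverse)

-- ===== PORT B =====
-- forward pass over (item, first-matching-prefix) pairs: each item is judged
-- against the pairs after it ('rest')
def pvBGo : List (String × Option String) → List String × List String
  | [] => ([], [])
  | (item, matched) :: rest =>
    let acc := pvBGo rest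
    match matched with
    | none => if (rest.map Prod.fst).contains item then acc else (item :: acc.1, acc.2)
    | some p =>
        if (rest.map Prod.snd).contains (some p) then (acc.1, item :: acc.2)
        else (item :: acc.1, acc.2)

def dedupe_latest_by_prefix_with_overflow_py_alt (items : List String) (prefixes : List String) : List String × List String :=
  let firsts := items.map (pvFirstPrefix prefixes)
  pvBGo (items.zip firsts)

-- ===== PRECONDITION & SPEC =====
def Spec_dedupe_latest_by_prefix_with_overflow_py (items : List String) (prefixes : List String) (out : List String × List String) : Prop := out = dedupe_latest_by_prefix_with_overflow_py_alt items prefixes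
instance (items : List String) (prefixes : List String) (out : List String × List String) : Decidable (Spec_dedupe_latest_by_prefix_with_overflow_py items prefixes out) := by unfold Spec_dedupe_latest_by_prefix_with_overflow_py; infer_instance

-- ===== CLAIM (what is proved, stated in full; the proofs are below) =====
def Claim_equal_dedupe_latest_by_prefix_with_overflow_py : Prop := ∀ (items : List String) (prefixes : List String), Dom_dedupe_latest_by_prefix_with_overflow_py items prefixes → Spec_dedupe_latest_by_prefix_with_overflow_py items prefixes (dedupe_latest_by_prefix_with_overflow_py items prefixes)

-- ===== LEMMAS AND PROOFS =====

-- proof-side restatement of B's forward pass, recomputing first prefixes on the fly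
def pvBSpec (prefixes : List String) : List String → List String × List String
  | [] => ([], [])
  | item :: rest =>
    let acc := pvBSpec prefixes rest
    match pvFirstPrefix prefixes item with
    | none => if rest.contains item then acc else (item :: acc.1, acc.2)
    | some p =>
        if rest.any (fun y => pvFirstPrefix prefixes y == some p) then (acc.1, item :: acc.2)
        else (item :: acc.1, acc.2)

lemma pvSnd_zip_contains (f : String → Option String) (t : List String) (p : String) :
    ((t.zip (t.map f)).map Prod.snd).contains (some p) = t.any (fun y => f y == some p) := by
  induction t with
  | nil => rfl
  | cons y u ih =>
    simp [List.contains_eq_mem] at ih ⊢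
    rw [ih]
    cases f y with
    | none => simp
    | some a =>
      by_cases h : p = a
      · simp [h]
      · have h2 : a ≠ p := fun e => h e.symm
        have hpa : ((some p : Option String) == some a) = false := by simp [h]
        have hap : ((some a : Option String) == some p) = false := by simp [h2]
        rw [hpa, hap]

lemma pvBGo_zip (prefixes : List String) (l : List String) :
    pvBGo (l.zip (l.map (pvFirstPrefix prefixes))) = pvBSpec prefixes l := by
  induction l with
  | nil => rfl
  | cons x t ih =>
    have hfst : (t.zip (t.map (pvFirstPrefix prefixes))).map Prod.fst = t :=
      List.map_fst_zip (by simp)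
    simp only [List.map_cons, List.zip_cons_cons, pvBGo, pvBSpec, ih, hfst,
      pvSnd_zip_contains]

-- everything B keeps was in the input
lemma pvBSpec_kept_subset (prefixes : List String) (l : List String) (x : String)
    (hx : x ∈ (pvBSpec prefixes l).1) : x ∈ l := by
  induction l with
  | nil => simp [pvBSpec] at hx
  | cons y t ih =>
    simp only [pvBSpec] at hx
    rcases hfp : pvFirstPrefix prefixes y with _ | p <;> simp only [hfp] at hx
    · split at hx
      · exact List.mem_cons_of_mem _ (ih hx)
      · rcases List.mem_cons.mp hx with rfl | hx
        · exact List.mem_cons_self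
        · exact List.mem_cons_of_mem _ (ih hx)
    · split at hx
      · exact List.mem_cons_of_mem _ (ih hx)
      · rcases List.mem_cons.mp hx with rfl | hx
        · exact List.mem_cons_self
        · exact List.mem_cons_of_mem _ (ih hx)

-- a non-matched element of the input is in B's kept list
lemma pvBSpec_kept_of_mem (prefixes : List String) (l : List String) (x : String)
    (hfp : pvFirstPrefix prefixes x = none) (hx : x ∈ l) : x ∈ (pvBSpec prefixes l).1 := by
  induction l with
  | nil => simp at hx
  | cons y t ih =>
    simp only [pvBSpec]
    rcases List.mem_cons.mp hx with rfl | hxt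
    · rw [hfp]
      by_cases hc : x ∈ t
      · simpa [hc] using ih hc
      · simp [hc]
    · have hk := ih hxt
      rcases hy : pvFirstPrefix prefixes y with _ | p <;> simp only [hy] <;>
        split <;> simp [hk]

-- loop invariant: A's state after processing the reversed list equals B's
-- forward result (reversed), and seen_prefixes holds exactly the first-prefixes
-- occurring among the processed items
lemma pvInv (prefixes : List String) (l : List String) :
    (l.reverse.foldl (pvAStep prefixes) ([], [], PySem.Set.empty)).1 = (pvBSpec prefixes l).1.reverse ∧
    (l.reverse.foldl (pvAStep prefixes) ([], [], PySem.Set.empty)).2.1 = (pvBSpec prefixes l).2.reverse ∧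
    ∀ q, q ∈ (l.reverse.foldl (pvAStep prefixes) ([], [], PySem.Set.empty)).2.2
          ↔ (l.any (fun y => pvFirstPrefix prefixes y == some q)) = true := by
  induction l with
  | nil =>
    refine ⟨rfl, rfl, ?_⟩
    intro q
    simp [PySem.Set.empty]
  | cons x t ih =>
    obtain ⟨hk, ho, hs⟩ := ih
    rw [List.reverse_cons, List.foldl_append]
    set st := t.reverse.foldl (pvAStep prefixes) ([], [], PySem.Set.empty) with hst
    simp only [List.foldl_cons, List.foldl_nil]
    rcases hfp : pvFirstPrefix prefixes x with _ | p
    · -- non-matched item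
      have hmem : st.1.contains x = t.contains x := by
        rw [hk]
        by_cases hx : x ∈ t
        · have h1 := pvBSpec_kept_of_mem prefixes t x hfp hx
          simp [List.contains_eq_mem, List.mem_reverse, hx, h1]
        · have h1 : x ∉ (pvBSpec prefixes t).1 := fun h => hx (pvBSpec_kept_subset prefixes t x h)
          simp [List.contains_eq_mem, List.mem_reverse, hx, h1]
      simp only [pvAStep, hfp, hmem, pvBSpec]
      by_cases hx : x ∈ t
      · simp only [List.contains_eq_mem, hx, decide_true, if_true]
        refine ⟨hk, ho, ?_⟩
        intro q
        simp [hs q, hfp]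
      · simp only [List.contains_eq_mem, hx, decide_false, Bool.false_eq_true, if_false]
        refine ⟨by simp [hk], ho, ?_⟩
        intro q
        simp [hs q, hfp]
    · -- matched item with first prefix p
      have hcond : PySem.Set.contains st.2.2 p = t.any (fun y => pvFirstPrefix prefixes y == some p) := by
        by_cases hc : (t.any (fun y => pvFirstPrefix prefixes y == some p)) = true
        · have h1 : p ∈ st.2.2 := (hs p).mpr hc
          simp [List.contains_eq_mem, h1, hc]
        · have h1 : p ∉ st.2.2 := fun h => hc ((hs p).mp h)
          simp only [Bool.not_eq_true] at hc
          simp [List.contains_eq_mem, h1, hc]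
      simp only [pvAStep, hfp, hcond, pvBSpec]
      by_cases hc : (t.any (fun y => pvFirstPrefix prefixes y == some p)) = true
      · simp only [hc, if_true]
        refine ⟨hk, by simp [ho], ?_⟩
        intro q
        by_cases hq : q = p
        · subst hq
          simp [hs q, hc, hfp]
        · simp [hs q, hfp, Ne.symm hq]
      · simp only [Bool.not_eq_true] at hc
        simp only [hc, Bool.false_eq_true, if_false]
        refine ⟨by simp [hk], ho, ?_⟩
        intro q
        rw [PySem.Set.mem_add]
        by_cases hq : q = p
        · subst hq
          simp [hfp]
        · simp [hs q, hfp, hq, Ne.symm hq]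

-- ===== VERDICT (by name: the statement is the Claim_ definition above) =====
theorem dedupe_latest_by_prefix_with_overflow_py_spec : Claim_equal_dedupe_latest_by_prefix_with_overflow_py := by
  intro items prefixes _
  unfold Spec_dedupe_latest_by_prefix_with_overflow_py dedupe_latest_by_prefix_with_overflow_py
    dedupe_latest_by_prefix_with_overflow_py_alt
  obtain ⟨hk, ho, -⟩ := pvInv prefixes items
  simp only [hk, ho, List.reverse_reverse, pvBGo_zip]
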